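-- pv_equiv track=rewrite | github.com/Sadriica/11208 | Send.py | dfs_free
-- ===== SOURCE A (Python) =====
-- def dfs_free(matrix, visited, i, j, parking_slots, parking_busy, airports_main):
--     rows = len(matrix)
--     cols = len(matrix[0])
--     visited[i][j] = True
--
--     if (i, j) in parking_slots:
--         parking_busy.append((i, j))
--         return i, j
--
--     result = None
--     for x, y in [(i + 1, j), (i - 1, j), (i, j + 1), (i, j - 1)]:
--         if 0 <= x < rows and 0 <= y < cols and matrix[x][y] and not visited[x][y]:
--             res = dfs_free(matrix, visited, x, y, parking_slots, parking_busy, airports_main)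
--             if res is not None:
--                 result = res
--                 break
--
--     return result
-- ===== SOURCE B (Python) =====
-- def dfs_free(matrix, visited, i, j, parking_slots, parking_busy, airports_main):
--     # Iterative DFS with an explicit stack instead of recursion.
--     # Mutates visited and parking_busy the same way A does (same cells marked,
--     # same single slot appended); equivalence claimed for the return value.
--     rows = len(matrix)
--     cols = len(matrix[0])
--     stack = [(i, j)]
--     start = True
--     while stack:
--         x, y = stack.pop()
--         if not start and not (0 <= x < rows and 0 <= y < cols
--                               and matrix[x][y] and not visited[x][y]):
--             continue
--         start = False
--         visited[x][y] = True
--         if (x, y) in parking_slots: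
--             parking_busy.append((x, y))
--             return x, y
--         # push left, right, up, down so that down is popped first (A's order)
--         stack.extend([(x, y - 1), (x, y + 1), (x - 1, y), (x + 1, y)])
--     return None
-- ===== Notes on version B (the rewrite author's own statement) =====
-- stated objective: idiomatic
-- what changed: Replaces A's recursive DFS with an iterative DFS over an explicit list-as-stack (neighbors pushed left,right,up,down so down is popped first; full guard re-checked at pop; start cell processed unconditionally), avoiding Python recursion and its depth limit.
import Mathlib
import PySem

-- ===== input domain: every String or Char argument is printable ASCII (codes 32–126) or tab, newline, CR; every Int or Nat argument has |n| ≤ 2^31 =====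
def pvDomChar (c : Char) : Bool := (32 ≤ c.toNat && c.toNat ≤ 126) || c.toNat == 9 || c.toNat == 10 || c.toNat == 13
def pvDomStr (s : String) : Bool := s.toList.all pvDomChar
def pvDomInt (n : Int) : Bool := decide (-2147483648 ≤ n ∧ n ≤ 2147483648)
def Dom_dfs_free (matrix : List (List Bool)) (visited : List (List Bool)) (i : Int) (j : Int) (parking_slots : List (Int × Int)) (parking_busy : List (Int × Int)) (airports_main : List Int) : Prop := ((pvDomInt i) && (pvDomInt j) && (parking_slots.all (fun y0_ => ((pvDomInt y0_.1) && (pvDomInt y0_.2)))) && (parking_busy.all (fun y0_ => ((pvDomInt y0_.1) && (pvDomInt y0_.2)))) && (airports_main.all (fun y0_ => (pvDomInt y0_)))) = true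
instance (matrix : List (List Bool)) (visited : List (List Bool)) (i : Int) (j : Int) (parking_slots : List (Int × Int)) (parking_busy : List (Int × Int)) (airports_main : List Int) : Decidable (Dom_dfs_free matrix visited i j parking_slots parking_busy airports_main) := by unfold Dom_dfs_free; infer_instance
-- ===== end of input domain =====

-- B replaces A's recursive DFS with an iterative DFS over an explicit list-as-stack
-- (same traversal order, objective: idiomatic, no recursion depth limit).
-- Both A and B mutate `visited` and `parking_busy` in Python (identically, as tested);
-- the equivalence proved here is about the RETURN value.

-- ===== PORT A =====
-- Shared primitives mirroring the Python expressions used by BOTH sources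
-- (`visited[x][y] = True`, reads of matrix/visited, and the common guard
-- `0 <= x < rows and 0 <= y < cols and matrix[x][y] and not visited[x][y]`).
-- Reads/writes are exact for the in-range nonnegative indices admitted by Pre_.
-- Python index with negative wraparound: xs[x] reads xs[x + len xs] for x < 0
def pvIdx (n : Nat) (x : Int) : Int := if x < 0 then x + n else x

-- `visited[x][y] = True` (no-op where Python would raise IndexError; Pre_ excludes those)
def pvSetT (v : List (List Bool)) (x y : Int) : List (List Bool) :=
  if 0 ≤ pvIdx v.length x then
    v.modify (pvIdx v.length x).toNat
      (fun r => if 0 ≤ pvIdx r.length y then r.set (pvIdx r.length y).toNat true else r)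
  else v

def pvMat (m : List (List Bool)) (x y : Int) : Bool :=
  if 0 ≤ x ∧ 0 ≤ y then (m.getD x.toNat []).getD y.toNat false else false

def pvVis (v : List (List Bool)) (x y : Int) : Bool :=
  if 0 ≤ x ∧ 0 ≤ y then (v.getD x.toNat []).getD y.toNat true else true

def pvGuard (m : List (List Bool)) (rows cols : Int) (v : List (List Bool)) (x y : Int) : Bool :=
  decide (0 ≤ x) && decide (x < rows) && decide (0 ≤ y) && decide (y < cols)
    && pvMat m x y && !(pvVis v x y)

-- A's recursion, fuel-guarded for totality only (the top level passes enough fuel: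
-- each recursive call enters an unvisited cell and marks it).
mutual
def pvGoA (m : List (List Bool)) (rows cols : Int) (slots : List (Int × Int))
    (f : Nat) (v : List (List Bool)) (x y : Int) : List (List Bool) × Option (Int × Int) :=
  match f with
  | 0 => (v, none)
  | Nat.succ f' =>
    let v1 := pvSetT v x y
    if (x, y) ∈ slots then (v1, some (x, y))
    else pvLoopA m rows cols slots f' v1 [(x + 1, y), (x - 1, y), (x, y + 1), (x, y - 1)]
termination_by (f, 0)

-- A's `for x, y in [...]` loop with its early `break` on a non-None result.
def pvLoopA (m : List (List Bool)) (rows cols : Int) (slots : List (Int × Int))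
    (f : Nat) (v : List (List Bool)) (l : List (Int × Int)) : List (List Bool) × Option (Int × Int) :=
  match l with
  | [] => (v, none)
  | (a, b) :: rest =>
    if pvGuard m rows cols v a b then
      match pvGoA m rows cols slots f v a b with
      | (v2, some r) => (v2, some r)
      | (v2, none) => pvLoopA m rows cols slots f v2 rest
    else pvLoopA m rows cols slots f v rest
termination_by (f, l.length + 1)
end

def pvSize (v : List (List Bool)) : Nat := (v.map List.length).sum

def dfs_free (matrix : List (List Bool)) (visited : List (List Bool)) (i : Int) (j : Int) (parking_slots : List (Int × Int)) (parking_busy : List (Int × Int)) (airports_main : List Int) : Option (Int × Int) :=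
  (pvGoA matrix (matrix.length : Int) (((matrix.headD []).length : Nat) : Int) parking_slots
    (pvSize visited + 1) visited i j).2

-- ===== PORT B =====
-- B's while-loop over the explicit stack (top of stack = head of the list;
-- Python's stack.extend([(x,y-1),(x,y+1),(x-1,y),(x+1,y)]) + pop-from-end puts
-- (x+1,y) on top). Fuel is again only a totality guard.
def pvRunB (m : List (List Bool)) (rows cols : Int) (slots : List (Int × Int))
    (f : Nat) (first : Bool) (v : List (List Bool)) (stack : List (Int × Int)) :
    List (List Bool) × Option (Int × Int) :=
  match f, stack with
  | _, [] => (v, none)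
  | 0, _ :: _ => (v, none)
  | Nat.succ f', (x, y) :: rest =>
    if !first && !(pvGuard m rows cols v x y) then
      pvRunB m rows cols slots f' first v rest
    else
      let v1 := pvSetT v x y
      if (x, y) ∈ slots then (v1, some (x, y))
      else pvRunB m rows cols slots f' false v1
        ((x + 1, y) :: (x - 1, y) :: (x, y + 1) :: (x, y - 1) :: rest)

def dfs_free_alt (matrix : List (List Bool)) (visited : List (List Bool)) (i : Int) (j : Int) (parking_slots : List (Int × Int)) (parking_busy : List (Int × Int)) (airports_main : List Int) : Option (Int × Int) :=
  (pvRunB matrix (matrix.length : Int) (((matrix.headD []).length : Nat) : Int) parking_slots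
    (5 * pvSize visited + 7) true visited [(i, j)]).2

-- ===== PRECONDITION & SPEC =====
-- Pre_ admits a non-empty matrix with a start index valid for `visited`
-- (negative Python wraparound included) whenever the start cell is a parking
-- slot (any grid shape) or the grid rows cover len(matrix[0]) columns with
-- rows(matrix) ≤ rows(visited). It excludes inputs where Python A raises
-- IndexError (empty matrix, invalid start index, a too-short row the DFS
-- reaches) and the remaining ragged grids, where A's returning at all is an
-- accident of which cells the DFS happens to reach.
def Pre_dfs_free (matrix : List (List Bool)) (visited : List (List Bool)) (i : Int) (j : Int) (parking_slots : List (Int × Int)) (parking_busy : List (Int × Int)) (airports_main : List Int) : Prop :=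
  matrix ≠ [] ∧
  (0 ≤ pvIdx visited.length i ∧ pvIdx visited.length i < (visited.length : Int) ∧
   0 ≤ pvIdx (visited.getD (pvIdx visited.length i).toNat []).length j ∧
   pvIdx (visited.getD (pvIdx visited.length i).toNat []).length j
     < ((visited.getD (pvIdx visited.length i).toNat []).length : Int)) ∧
  ((i, j) ∈ parking_slots ∨
   ((∀ r ∈ matrix, (matrix.headD []).length ≤ r.length) ∧
    matrix.length ≤ visited.length ∧
    (∀ r ∈ visited, (matrix.headD []).length ≤ r.length)))
instance (matrix : List (List Bool)) (visited : List (List Bool)) (i : Int) (j : Int) (parking_slots : List (Int × Int)) (parking_busy : List (Int × Int)) (airports_main : List Int) : Decidable (Pre_dfs_free matrix visited i j parking_slots parking_busy airports_main) := by unfold Pre_dfs_free; infer_instance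

def pvWitness_dfs_free : List (List Bool) × List (List Bool) × Int × Int × (List (Int × Int)) × (List (Int × Int)) × List Int :=
  ([[true, true], [true, false]], [[false, false], [false, false]], 0, 0, [(1, 0)], [], [])

def Spec_dfs_free (matrix : List (List Bool)) (visited : List (List Bool)) (i : Int) (j : Int) (parking_slots : List (Int × Int)) (parking_busy : List (Int × Int)) (airports_main : List Int) (out : Option (Int × Int)) : Prop := out = dfs_free_alt matrix visited i j parking_slots parking_busy airports_main
instance (matrix : List (List Bool)) (visited : List (List Bool)) (i : Int) (j : Int) (parking_slots : List (Int × Int)) (parking_busy : List (Int × Int)) (airports_main : List Int) (out : Option (Int × Int)) : Decidable (Spec_dfs_free matrix visited i j parking_slots parking_busy airports_main out) := by unfold Spec_dfs_free; infer_instance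

-- ===== CLAIM (what is proved, stated in full; the proofs are below) =====
def Claim_equal_dfs_free : Prop := ∀ (matrix : List (List Bool)) (visited : List (List Bool)) (i : Int) (j : Int) (parking_slots : List (Int × Int)) (parking_busy : List (Int × Int)) (airports_main : List Int), Dom_dfs_free matrix visited i j parking_slots parking_busy airports_main → Pre_dfs_free matrix visited i j parking_slots parking_busy airports_main → Spec_dfs_free matrix visited i j parking_slots parking_busy airports_main (dfs_free matrix visited i j parking_slots parking_busy airports_main)

-- ===== LEMMAS AND PROOFS =====

-- shape invariant: the visited grid covers at least rows × cols
def PvShape (rows cols : Int) (v : List (List Bool)) : Prop :=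
  rows ≤ (v.length : Int) ∧ ∀ r ∈ v, cols ≤ (r.length : Int)

-- number of unvisited cells: the decreasing measure of both traversals
def pvFc (v : List (List Bool)) : Nat := (v.map (fun r => r.count false)).sum

-- decreasing measure of B's while loop
def pvMea (first : Bool) (v : List (List Bool)) (s : List (Int × Int)) : Nat :=
  s.length + 5 * pvFc v + (if first then 5 else 0)

theorem length_pvSetT (v : List (List Bool)) (x y : Int) :
    (pvSetT v x y).length = v.length := by
  unfold pvSetT; split <;> simp [List.length_modify]

theorem shape_pvSetT {rows cols : Int} {v : List (List Bool)} (h : PvShape rows cols v)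
    (x y : Int) : PvShape rows cols (pvSetT v x y) := by
  obtain ⟨h1, h2⟩ := h
  refine ⟨by rw [length_pvSetT]; exact h1, ?_⟩
  intro r hr
  unfold pvSetT at hr
  split at hr
  · obtain ⟨k, hk, rfl⟩ := List.mem_iff_getElem.mp hr
    have hk' : k < v.length := by simpa [List.length_modify] using hk
    rw [List.getElem_modify]
    split
    · split
      · simpa [List.length_set] using h2 _ (List.getElem_mem hk')
      · exact h2 _ (List.getElem_mem hk')
    · exact h2 _ (List.getElem_mem hk')
  · exact h2 r hr

theorem count_false_set_le (r : List Bool) (k : Nat) :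
    (r.set k true).count false ≤ r.count false := by
  induction r generalizing k with
  | nil => simp
  | cons a t ih =>
    cases k with
    | zero => cases a <;> simp
    | succ k => simp [List.count_cons]; have := ih k; omega

theorem count_false_set_eq (r : List Bool) (k : Nat) (hk : k < r.length)
    (hf : r[k] = false) : (r.set k true).count false + 1 = r.count false := by
  induction r generalizing k with
  | nil => simp at hk
  | cons a t ih =>
    cases k with
    | zero => simp at hf; subst hf; simp
    | succ k =>
      simp at hf hk
      have := ih k hk hf
      simp [List.count_cons]; omega

theorem pvFc_modify_f_le (v : List (List Bool)) (k : Nat) (f : List Bool → List Bool)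
    (hf : ∀ r, (f r).count false ≤ r.count false) :
    pvFc (v.modify k f) ≤ pvFc v := by
  induction v generalizing k with
  | nil => simp [pvFc]
  | cons a t ih =>
    cases k with
    | zero => simp only [List.modify_zero_cons, pvFc, List.map_cons, List.sum_cons]
              have := hf a; omega
    | succ k =>
      simp only [List.modify_succ_cons, pvFc, List.map_cons, List.sum_cons]
      have := ih k; simp only [pvFc] at this; omega

theorem pvFc_modify_f_eq (v : List (List Bool)) (k : Nat) (f : List Bool → List Bool)
    (hk : k < v.length) (hf : (f v[k]).count false + 1 = v[k].count false) :
    pvFc (v.modify k f) + 1 = pvFc v := by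
  induction v generalizing k with
  | nil => simp at hk
  | cons a t ih =>
    cases k with
    | zero =>
      simp only [List.getElem_cons_zero] at hf
      simp only [List.modify_zero_cons, pvFc, List.map_cons, List.sum_cons]
      omega
    | succ k =>
      simp only [List.getElem_cons_succ] at hf
      simp only [List.length_cons, Nat.succ_lt_succ_iff] at hk
      have := ih k hk hf
      simp only [List.modify_succ_cons, pvFc, List.map_cons, List.sum_cons] at *
      omega

theorem pvFc_setT_le (v : List (List Bool)) (x y : Int) :
    pvFc (pvSetT v x y) ≤ pvFc v := by
  unfold pvSetT
  split
  · refine pvFc_modify_f_le _ _ _ (fun r => ?_)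
    split
    · exact count_false_set_le r _
    · exact le_refl _
  · exact le_refl _

-- a true guard marks a genuinely unvisited in-range cell: the measure drops
theorem guard_fc {m : List (List Bool)} {rows cols : Int} {v : List (List Bool)} {x y : Int}
    (hs : PvShape rows cols v) (hg : pvGuard m rows cols v x y = true) :
    pvFc (pvSetT v x y) + 1 = pvFc v := by
  unfold pvGuard at hg
  simp only [Bool.and_eq_true, decide_eq_true_eq, Bool.not_eq_true'] at hg
  obtain ⟨⟨⟨⟨⟨hx0, hxr⟩, hy0⟩, hyc⟩, -⟩, hvis⟩ := hg
  obtain ⟨h1, h2⟩ := hs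
  have hxl : x.toNat < v.length := by omega
  have hrow : cols ≤ ((v[x.toNat]).length : Int) := h2 _ (List.getElem_mem hxl)
  have hyl : y.toNat < (v[x.toNat]).length := by omega
  unfold pvVis at hvis
  rw [if_pos ⟨hx0, hy0⟩, List.getD_eq_getElem v [] hxl, List.getD_eq_getElem _ true hyl] at hvis
  have hix : pvIdx v.length x = x := by unfold pvIdx; rw [if_neg (by omega)]
  unfold pvSetT
  rw [hix, if_pos hx0]
  refine pvFc_modify_f_eq v x.toNat _ hxl ?_
  have hiy : pvIdx (v[x.toNat]).length y = y := by unfold pvIdx; rw [if_neg (by omega)]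
  rw [hiy, if_pos hy0]
  exact count_false_set_eq _ y.toNat hyl hvis

theorem guard_one_le {m : List (List Bool)} {rows cols : Int} {v : List (List Bool)} {x y : Int}
    (hs : PvShape rows cols v) (hg : pvGuard m rows cols v x y = true) : 1 ≤ pvFc v := by
  have := guard_fc hs hg; omega

theorem pvFc_le_size (v : List (List Bool)) : pvFc v ≤ pvSize v := by
  induction v with
  | nil => simp [pvFc, pvSize]
  | cons a t ih =>
    simp only [pvFc, pvSize, List.map_cons, List.sum_cons] at *
    have : a.count false ≤ a.length := List.count_le_length
    omega

-- unfolding equations (the ports are fuel/match definitions; these name their steps)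
theorem pvGoA_succ (m : List (List Bool)) (rows cols : Int) (slots : List (Int × Int))
    (f : Nat) (v : List (List Bool)) (x y : Int) :
    pvGoA m rows cols slots (f + 1) v x y =
      (if (x, y) ∈ slots then (pvSetT v x y, some (x, y))
       else pvLoopA m rows cols slots f (pvSetT v x y)
         [(x + 1, y), (x - 1, y), (x, y + 1), (x, y - 1)]) := by
  rw [pvGoA]

theorem pvRunB_nil (m : List (List Bool)) (rows cols : Int) (slots : List (Int × Int))
    (f : Nat) (first : Bool) (v : List (List Bool)) :
    pvRunB m rows cols slots f first v [] = (v, none) := by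
  cases f <;> rfl

theorem pvRunB_cons (m : List (List Bool)) (rows cols : Int) (slots : List (Int × Int))
    (f : Nat) (first : Bool) (v : List (List Bool)) (x y : Int) (rest : List (Int × Int)) :
    pvRunB m rows cols slots (f + 1) first v ((x, y) :: rest) =
      (if !first && !(pvGuard m rows cols v x y) then
        pvRunB m rows cols slots f first v rest
      else if (x, y) ∈ slots then (pvSetT v x y, some (x, y))
      else pvRunB m rows cols slots f false (pvSetT v x y)
        ((x + 1, y) :: (x - 1, y) :: (x, y + 1) :: (x, y - 1) :: rest)) := rfl

-- monotonicity of A's traversal: shape is preserved and the measure never grows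
theorem pvA_mono (m : List (List Bool)) (rows cols : Int) (slots : List (Int × Int)) :
    ∀ f : Nat,
      (∀ v x y, PvShape rows cols v →
        PvShape rows cols (pvGoA m rows cols slots f v x y).1 ∧
        pvFc (pvGoA m rows cols slots f v x y).1 ≤ pvFc v) ∧
      (∀ v l, PvShape rows cols v →
        PvShape rows cols (pvLoopA m rows cols slots f v l).1 ∧
        pvFc (pvLoopA m rows cols slots f v l).1 ≤ pvFc v) := by
  intro f
  induction f with
  | zero =>
    have hgo : ∀ v x y, PvShape rows cols v →
        PvShape rows cols (pvGoA m rows cols slots 0 v x y).1 ∧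
        pvFc (pvGoA m rows cols slots 0 v x y).1 ≤ pvFc v := by
      intro v x y hs; rw [pvGoA]; exact ⟨hs, le_refl _⟩
    refine ⟨hgo, ?_⟩
    intro v l
    induction l generalizing v with
    | nil => intro hs; rw [pvLoopA]; exact ⟨hs, le_refl _⟩
    | cons p rest ih =>
      intro hs
      obtain ⟨a, b⟩ := p
      rw [pvLoopA]
      split
      · rcases hA : pvGoA m rows cols slots 0 v a b with ⟨v2, r⟩
        have h2 := hgo v a b hs; rw [hA] at h2
        cases r with
        | some r => simpa using h2
        | none =>
          simp only
          have h3 := ih v2 h2.1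
          exact ⟨h3.1, le_trans h3.2 h2.2⟩
      · exact ih v hs
  | succ f ih =>
    have hgo : ∀ v x y, PvShape rows cols v →
        PvShape rows cols (pvGoA m rows cols slots (f+1) v x y).1 ∧
        pvFc (pvGoA m rows cols slots (f+1) v x y).1 ≤ pvFc v := by
      intro v x y hs
      rw [pvGoA]
      have hs1 := shape_pvSetT hs x y
      have hf1 := pvFc_setT_le v x y
      split
      · exact ⟨hs1, hf1⟩
      · have := ih.2 (pvSetT v x y) [(x + 1, y), (x - 1, y), (x, y + 1), (x, y - 1)] hs1
        exact ⟨this.1, le_trans this.2 hf1⟩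
    refine ⟨hgo, ?_⟩
    intro v l
    induction l generalizing v with
    | nil => intro hs; rw [pvLoopA]; exact ⟨hs, le_refl _⟩
    | cons p rest ih2 =>
      intro hs
      obtain ⟨a, b⟩ := p
      rw [pvLoopA]
      split
      · rcases hA : pvGoA m rows cols slots (f+1) v a b with ⟨v2, r⟩
        have h2 := hgo v a b hs; rw [hA] at h2
        cases r with
        | some r => simpa using h2
        | none =>
          simp only
          have h3 := ih2 v2 h2.1
          exact ⟨h3.1, le_trans h3.2 h2.2⟩
      · exact ih2 v hs

-- with enough fuel, B's result does not depend on the exact fuel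
theorem pvB_irrel (m : List (List Bool)) (rows cols : Int) (slots : List (Int × Int)) :
    ∀ f g first v s, PvShape rows cols v → pvMea first v s < f → pvMea first v s < g →
      pvRunB m rows cols slots f first v s = pvRunB m rows cols slots g first v s := by
  intro f
  induction f with
  | zero => intro g first v s _ hf _; exact absurd hf (by omega)
  | succ f ih =>
    intro g first v s hs hf hg
    cases s with
    | nil => rw [pvRunB]; cases g <;> rw [pvRunB]
    | cons p rest =>
      obtain ⟨x, y⟩ := p
      have hm : 1 ≤ pvMea first v ((x, y) :: rest) := by simp [pvMea]; omega
      obtain ⟨g', rfl⟩ : ∃ g', g = g' + 1 := ⟨g - 1, by omega⟩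
      rw [pvRunB, pvRunB]
      split
      · next hcond =>
        have hfirst : first = false := by
          cases first
          · rfl
          · simp at hcond
        subst hfirst
        exact ih g' false v rest hs
          (by simp [pvMea] at *; omega) (by simp [pvMea] at *; omega)
      · next hcond =>
        split
        · rfl
        · have hs1 := shape_pvSetT hs x y
          have hle := pvFc_setT_le v x y
          have hdrop : pvMea false (pvSetT v x y)
              ((x + 1, y) :: (x - 1, y) :: (x, y + 1) :: (x, y - 1) :: rest) + 2
              ≤ pvMea first v ((x, y) :: rest) := by
            cases first with
            | true => simp [pvMea]; omega
            | false =>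
              have hguard : pvGuard m rows cols v x y = true := by
                cases hgv : pvGuard m rows cols v x y
                · simp [hgv] at hcond
                · rfl
              have := guard_fc hs hguard
              simp [pvMea]; omega
          exact ih g' false (pvSetT v x y) _ hs1 (by omega) (by omega)

-- THE BRIDGE: running B's stack loop on `l ++ stack` is: run A's neighbour loop
-- on `l`; if it finds a slot that is the answer, otherwise continue with `stack`
-- in the visited state A's loop left behind.
theorem pvMain (m : List (List Bool)) (rows cols : Int) (slots : List (Int × Int)) :
    ∀ n : Nat, ∀ v, pvFc v ≤ n → PvShape rows cols v →
      ∀ l stack fA, pvFc v ≤ fA → ∀ fB, pvMea false v (l ++ stack) < fB →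
      pvRunB m rows cols slots fB false v (l ++ stack) =
        (match pvLoopA m rows cols slots fA v l with
         | (v', some r) => (v', some r)
         | (v', none) => pvRunB m rows cols slots (pvMea false v' stack + 1) false v' stack) := by
  intro n
  induction n with
  | zero =>
    intro v hv hs l stack fA hfa
    induction l with
    | nil =>
      intro fB hfb
      rw [pvLoopA]
      exact pvB_irrel m rows cols slots fB _ false v stack hs (by simpa using hfb) (by omega)
    | cons p rest ih =>
      intro fB hfb
      obtain ⟨x, y⟩ := p
      have h1 : 1 ≤ pvMea false v (((x, y) :: rest) ++ stack) := by simp [pvMea]; omega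
      obtain ⟨fB', rfl⟩ : ∃ fB', fB = fB' + 1 := ⟨fB - 1, by omega⟩
      rw [pvLoopA]
      cases hgv : pvGuard m rows cols v x y with
      | true => exact absurd hv (by have := guard_one_le hs hgv; omega)
      | false =>
        rw [if_neg (show ¬ (false = true) by decide)]
        rw [List.cons_append, pvRunB_cons, hgv,
          if_pos (show (!false && !false) = true by decide)]
        exact ih fB' (by simp [pvMea] at *; omega)
  | succ n ihn =>
    intro v hv hs l stack fA hfa
    induction l with
    | nil =>
      intro fB hfb
      rw [pvLoopA]
      exact pvB_irrel m rows cols slots fB _ false v stack hs (by simpa using hfb) (by omega)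
    | cons p rest ih =>
      intro fB hfb
      obtain ⟨x, y⟩ := p
      have h1 : 1 ≤ pvMea false v (((x, y) :: rest) ++ stack) := by simp [pvMea]; omega
      obtain ⟨fB', rfl⟩ : ∃ fB', fB = fB' + 1 := ⟨fB - 1, by omega⟩
      rw [List.cons_append, pvRunB_cons, pvLoopA]
      cases hgv : pvGuard m rows cols v x y with
      | false =>
        rw [if_pos (show (!false && !false) = true by decide),
          if_neg (show ¬ (false = true) by decide)]
        exact ih fB' (by simp [pvMea] at *; omega)
      | true =>
        rw [if_neg (show ¬ ((!false && !true) = true) by decide),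
          if_pos (show (true = true) by rfl)]
        have hone := guard_one_le hs hgv
        have hdrop := guard_fc hs hgv
        obtain ⟨fA', rfl⟩ : ∃ fA', fA = fA' + 1 := ⟨fA - 1, by omega⟩
        rw [pvGoA_succ]
        by_cases hmem : (x, y) ∈ slots
        · rw [if_pos hmem, if_pos hmem]
        · rw [if_neg hmem, if_neg hmem]
          have hs1 : PvShape rows cols (pvSetT v x y) := shape_pvSetT hs x y
          have hlist : ((x + 1, y) :: (x - 1, y) :: (x, y + 1) :: (x, y - 1) :: (rest ++ stack))
              = [(x + 1, y), (x - 1, y), (x, y + 1), (x, y - 1)] ++ (rest ++ stack) := rfl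
          rw [hlist]
          rw [ihn (pvSetT v x y) (by omega) hs1
            [(x + 1, y), (x - 1, y), (x, y + 1), (x, y - 1)] (rest ++ stack) fA'
            (by omega) fB' (by simp [pvMea] at *; omega)]
          rcases hL : pvLoopA m rows cols slots fA' (pvSetT v x y)
              [(x + 1, y), (x - 1, y), (x, y + 1), (x, y - 1)] with ⟨v2, r⟩
          have hmono := (pvA_mono m rows cols slots fA').2 (pvSetT v x y)
            [(x + 1, y), (x - 1, y), (x, y + 1), (x, y - 1)] hs1
          rw [hL] at hmono
          cases r with
          | some r => rfl
          | none =>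
            simp only
            have hfc2 : pvFc v2 ≤ pvFc (pvSetT v x y) := hmono.2
            exact ihn v2 (by omega) hmono.1 rest stack (fA' + 1) (by omega)
              (pvMea false v2 (rest ++ stack) + 1) (by omega)

-- ===== VERDICT helper =====
theorem dfs_free_eq (matrix visited : List (List Bool)) (i j : Int)
    (parking_slots parking_busy : List (Int × Int)) (airports_main : List Int)
    (hpre : Pre_dfs_free matrix visited i j parking_slots parking_busy airports_main) :
    dfs_free matrix visited i j parking_slots parking_busy airports_main
      = dfs_free_alt matrix visited i j parking_slots parking_busy airports_main := by
  obtain ⟨hne, -, hrest⟩ := hpre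
  by_cases hmem : (i, j) ∈ parking_slots
  · -- immediate hit: both ports take the slot branch at the start cell
    unfold dfs_free dfs_free_alt
    rw [pvGoA_succ,
        show 5 * pvSize visited + 7 = (5 * pvSize visited + 6) + 1 from rfl,
        pvRunB_cons,
        if_neg (show ¬ ((!true && !(pvGuard matrix ((matrix.length : Nat) : Int)
          (((matrix.headD []).length : Nat) : Int) visited i j)) = true) by simp),
        if_pos hmem, if_pos hmem]
  · obtain ⟨hmrows, hvlen, hvrows⟩ := hrest.resolve_left hmem
    have hs : PvShape ((matrix.length : Nat) : Int) (((matrix.headD []).length : Nat) : Int) visited := by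
      constructor
      · exact_mod_cast hvlen
      · intro r hr; exact_mod_cast hvrows r hr
    have hfcS : pvFc visited ≤ pvSize visited := pvFc_le_size visited
    have hs1 : PvShape ((matrix.length : Nat) : Int) (((matrix.headD []).length : Nat) : Int)
        (pvSetT visited i j) := shape_pvSetT hs i j
    have hfc1 : pvFc (pvSetT visited i j) ≤ pvSize visited :=
      le_trans (pvFc_setT_le visited i j) hfcS
    unfold dfs_free dfs_free_alt
    rw [pvGoA_succ,
        show 5 * pvSize visited + 7 = (5 * pvSize visited + 6) + 1 from rfl,
        pvRunB_cons,
        if_neg (show ¬ ((!true && !(pvGuard matrix ((matrix.length : Nat) : Int)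
          (((matrix.headD []).length : Nat) : Int) visited i j)) = true) by simp)]
    by_cases hmem : (i, j) ∈ parking_slots
    · rw [if_pos hmem, if_pos hmem]
    · rw [if_neg hmem, if_neg hmem]
      rw [show ((i + 1, j) :: (i - 1, j) :: (i, j + 1) :: (i, j - 1) :: ([] : List (Int × Int)))
          = [(i + 1, j), (i - 1, j), (i, j + 1), (i, j - 1)] ++ ([] : List (Int × Int)) from rfl]
      rw [pvMain matrix ((matrix.length : Nat) : Int) (((matrix.headD []).length : Nat) : Int)
        parking_slots (pvFc (pvSetT visited i j)) (pvSetT visited i j) (le_refl _) hs1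
        [(i + 1, j), (i - 1, j), (i, j + 1), (i, j - 1)] [] (pvSize visited) hfc1
        (5 * pvSize visited + 6) (by simp [pvMea]; omega)]
      rw [List.append_nil]
      rcases hL : pvLoopA matrix ((matrix.length : Nat) : Int) (((matrix.headD []).length : Nat) : Int)
          parking_slots (pvSize visited) (pvSetT visited i j)
          [(i + 1, j), (i - 1, j), (i, j + 1), (i, j - 1)] with ⟨v2, r⟩
      cases r with
      | some r => rfl
      | none => exact congrArg Prod.snd (pvRunB_nil _ _ _ _ _ _ _).symm

-- ===== VERDICT (by name: the statement is the Claim_ definition above) =====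
theorem dfs_free_spec : Claim_equal_dfs_free := by
  intro matrix visited i j parking_slots parking_busy airports_main _ hpre
  unfold Spec_dfs_free
  exact dfs_free_eq matrix visited i j parking_slots parking_busy airports_main hpre
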